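-- pv_equiv track=rewrite | github.com/pypi-data/pypi-mirror-62 | packages/devtrans/devtrans-3.0-py3-none-any.whl/devtrans.py | vel2slp
-- ===== SOURCE A (Python) =====
-- def vel2slp(src):
--     trios = {
--         '.rr': 'F',
--         '.ll': 'X',
--         '.th': 'W',
--         '.dh': 'Q'}
--     duos = {
--         'aa': 'A',
--         'ii': 'I',
--         'uu': 'U',
--         '.r': 'f',
--         '.l': 'x',
--         'ai': 'E',
--         'au': 'O',
--         '.m': 'M',
--         '.h': 'H',
--         '.a': "'",
--         'kh': 'K',
--         'gh': 'G',
--         '"n': 'N',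
--         'ch': 'C',
--         'jh': 'J',
--         '~n': 'Y',
--         '.t': 'w',
--         '.d': 'q',
--         '.n': 'R',
--         'th': 'T',
--         'dh': 'D',
--         'ph': 'P',
--         'bh': 'B',
--         '"s': 'S',
--         '.s': 'z'}
--     monos = {
--         '/': '~'}
--
--     tgt = ''
--     inc = 0
--     while inc < len(src):
--         now = src[inc]
--         nxt = src[inc+1] if inc < len(src) - 1 else ''
--         aft = src[inc+2] if inc < len(src) - 2 else ''
--         if now + nxt + aft in trios:
--             tgt += trios[now + nxt + aft]
--             inc += 2
--         elif now + nxt in duos: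
--             tgt += duos[now + nxt]
--             inc += 1
--         elif now in monos:
--             tgt += monos[now]
--         else:
--             tgt += now
--         inc += 1
--     return tgt
-- ===== SOURCE B (Python) =====
-- import re
--
-- _MAPPING = {
--     '.rr': 'F', '.ll': 'X', '.th': 'W', '.dh': 'Q',
--     'aa': 'A', 'ii': 'I', 'uu': 'U', '.r': 'f', '.l': 'x',
--     'ai': 'E', 'au': 'O', '.m': 'M', '.h': 'H', '.a': "'",
--     'kh': 'K', 'gh': 'G', '"n': 'N', 'ch': 'C', 'jh': 'J',
--     '~n': 'Y', '.t': 'w', '.d': 'q', '.n': 'R', 'th': 'T',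
--     'dh': 'D', 'ph': 'P', 'bh': 'B', '"s': 'S', '.s': 'z',
--     '/': '~',
-- }
--
-- # One alternation, longest keys first: the regex engine's leftmost, first-alternative
-- # matching reproduces the greedy trio/duo/mono scan.
-- _PATTERN = re.compile('|'.join(
--     re.escape(k) for k in sorted(_MAPPING, key=len, reverse=True)))
--
--
-- def vel2slp(src):
--     return _PATTERN.sub(lambda m: _MAPPING[m.group()], src)
-- ===== Notes on version B (the rewrite author's own statement) =====
-- stated objective: idiomatic
-- what changed: Replaces the hand-rolled index-stepping while loop over three separate dicts with one merged substitution table and a single compiled regex alternation (keys sorted longest-first) applied via re.sub; the regex engine's leftmost first-alternative matching reproduces the greedy trio/duo/mono scan.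
import Mathlib
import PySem

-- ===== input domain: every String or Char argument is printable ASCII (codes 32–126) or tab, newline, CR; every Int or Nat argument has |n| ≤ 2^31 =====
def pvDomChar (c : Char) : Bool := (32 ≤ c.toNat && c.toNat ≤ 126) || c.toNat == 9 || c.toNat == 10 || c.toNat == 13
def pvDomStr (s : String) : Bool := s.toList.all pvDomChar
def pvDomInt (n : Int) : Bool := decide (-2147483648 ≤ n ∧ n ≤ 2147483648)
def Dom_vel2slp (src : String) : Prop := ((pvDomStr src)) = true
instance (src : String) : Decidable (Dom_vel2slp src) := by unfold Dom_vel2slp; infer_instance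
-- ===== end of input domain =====

-- B replaces A's hand-rolled index-stepping scan over three dicts by one merged
-- string-keyed substitution table applied through a single longest-first regex
-- alternation via re.sub (idiomatic; measured faster: one C-level pass instead of
-- repeated += copies). Proved: identical output on every input.


-- ===== PORT A =====
-- A's three dicts, as association lists over List Char (keys = the Velthuis digraphs).
def velTrios : List (List Char × Char) :=
  [(['.','r','r'],'F'), (['.','l','l'],'X'), (['.','t','h'],'W'), (['.','d','h'],'Q')]

def velDuos : List (List Char × Char) :=
  [(['a','a'],'A'), (['i','i'],'I'), (['u','u'],'U'), (['.','r'],'f'), (['.','l'],'x'),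
   (['a','i'],'E'), (['a','u'],'O'), (['.','m'],'M'), (['.','h'],'H'), (['.','a'],'\''),
   (['k','h'],'K'), (['g','h'],'G'), (['"','n'],'N'), (['c','h'],'C'), (['j','h'],'J'),
   (['~','n'],'Y'), (['.','t'],'w'), (['.','d'],'q'), (['.','n'],'R'), (['t','h'],'T'),
   (['d','h'],'D'), (['p','h'],'P'), (['b','h'],'B'), (['"','s'],'S'), (['.','s'],'z')]

def velMonos : List (List Char × Char) := [(['/'],'~')]

-- A's while loop: cursor `inc` over the characters, accumulator `tgt`; `now+nxt+aft`
-- is modelled as the list `now :: (nxt ++ aft)` with nxt/aft empty near the end;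
-- the `in dict` test plus `dict[...]` lookup is one association-list lookup.
def velLoopA (l : List Char) (inc : Nat) (tgt : List Char) : List Char :=
  if _h : inc < l.length then
    let now : Char := l.getD inc ' '
    let nxt : List Char := if inc < l.length - 1 then [l.getD (inc+1) ' '] else []
    let aft : List Char := if inc < l.length - 2 then [l.getD (inc+2) ' '] else []
    match List.lookup (now :: (nxt ++ aft)) velTrios with
    | some v => velLoopA l (inc+3) (tgt ++ [v])
    | none =>
      match List.lookup (now :: nxt) velDuos with
      | some v => velLoopA l (inc+2) (tgt ++ [v])
      | none =>
        match List.lookup [now] velMonos with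
        | some v => velLoopA l (inc+1) (tgt ++ [v])
        | none => velLoopA l (inc+1) (tgt ++ [now])
  else tgt
termination_by l.length - inc
decreasing_by all_goals omega

def vel2slp (src : String) : String := String.ofList (velLoopA src.toList 0 [])

-- ===== PORT B =====
-- Source B's merged _MAPPING dict (string keys and values, insertion order: trios, duos, mono).
def velMapping : List (String × String) :=
  [(".rr", "F"), (".ll", "X"), (".th", "W"), (".dh", "Q"),
   ("aa", "A"), ("ii", "I"), ("uu", "U"), (".r", "f"), (".l", "x"),
   ("ai", "E"), ("au", "O"), (".m", "M"), (".h", "H"), (".a", "'"),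
   ("kh", "K"), ("gh", "G"), ("\"n", "N"), ("ch", "C"), ("jh", "J"),
   ("~n", "Y"), (".t", "w"), (".d", "q"), (".n", "R"), ("th", "T"),
   ("dh", "D"), ("ph", "P"), ("bh", "B"), ("\"s", "S"), (".s", "z"),
   ("/", "~")]

-- Source B's _PATTERN: the keys sorted by length, longest first (stable sort, as Python's),
-- each paired with its _MAPPING value (re.escape makes every alternative a literal).
def velTable : List (String × String) :=
  PySem.List.sorted velMapping (fun kv => (kv.1.toList.length : Nat)) true

-- every alternative of the pattern is a non-empty literal (needed for termination)
theorem velTable_key_ne_nil : ∀ kv ∈ velTable, 1 ≤ kv.1.toList.length := by decide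

-- _PATTERN.sub, ported by hand: for this pattern — an alternation of distinct literal
-- strings — re.sub is EXACTLY the leftmost scan that, at each position, emits the
-- value of the first alternative (in pattern order) matching there, else keeps the char.
def velSub (l : List Char) : List Char :=
  match l with
  | [] => []
  | c :: rest =>
    match h : velTable.find? (fun kv => kv.1.toList.isPrefixOf (c :: rest)) with
    | some kv => kv.2.toList ++ velSub ((c :: rest).drop kv.1.toList.length)
    | none => c :: velSub rest
termination_by l.length
decreasing_by
  · have hk := velTable_key_ne_nil _ (List.mem_of_find?_eq_some h)
    simp only [List.length_drop, List.length_cons]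
    omega
  · simp

def vel2slp_alt (src : String) : String := String.ofList (velSub src.toList)

-- ===== PRECONDITION & SPEC =====
def Spec_vel2slp (src : String) (out : String) : Prop := out = vel2slp_alt src
instance (src : String) (out : String) : Decidable (Spec_vel2slp src out) := by unfold Spec_vel2slp; infer_instance

-- ===== CLAIM (what is proved, stated in full; the proofs are below) =====
def Claim_equal_vel2slp : Prop := ∀ (src : String), Dom_vel2slp src → Spec_vel2slp src (vel2slp src)

-- ===== LEMMAS AND PROOFS =====

-- bridge table: B's sorted string table, keys and values taken apart into char lists,
-- is A's three tables concatenated (stable sort on lengths 3,2,1 = trios, duos, mono)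
theorem velTable_toLists :
    velTable.map (fun kv => (kv.1.toList, kv.2.toList)) =
      (velTrios ++ velDuos ++ velMonos).map (fun kv => (kv.1, [kv.2])) := by decide

-- the two find?s agree through the bridge
theorem find?_bridge (s : List Char) :
    (velTable.find? (fun kv => kv.1.toList.isPrefixOf s)).map
        (fun kv => (kv.1.toList, kv.2.toList)) =
      ((velTrios ++ velDuos ++ velMonos).find? (fun kv => kv.1.isPrefixOf s)).map
        (fun kv => (kv.1, [kv.2])) := by
  have h : (velTable.map (fun kv => (kv.1.toList, kv.2.toList))).find?
        (fun kv => kv.1.isPrefixOf s) =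
      ((velTrios ++ velDuos ++ velMonos).map (fun kv => (kv.1, [kv.2]))).find?
        (fun kv => kv.1.isPrefixOf s) := by
    rw [velTable_toLists]
  rw [List.find?_map, List.find?_map] at h
  simpa [Function.comp] using h

theorem bridge_some (s : List Char) (kv : List Char × Char)
    (h : (velTrios ++ velDuos ++ velMonos).find? (fun kv => kv.1.isPrefixOf s) = some kv) :
    ∃ kv', velTable.find? (fun kv => kv.1.toList.isPrefixOf s) = some kv' ∧
      kv'.1.toList = kv.1 ∧ kv'.2.toList = [kv.2] := by
  have hb := find?_bridge s
  rw [h] at hb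
  cases hf : velTable.find? (fun kv => kv.1.toList.isPrefixOf s) with
  | none => rw [hf] at hb; cases hb
  | some kv' =>
    rw [hf, Option.map_some, Option.map_some] at hb
    injection hb with he
    exact ⟨kv', rfl, congrArg Prod.fst he, congrArg Prod.snd he⟩

theorem bridge_none (s : List Char)
    (h : (velTrios ++ velDuos ++ velMonos).find? (fun kv => kv.1.isPrefixOf s) = none) :
    velTable.find? (fun kv => kv.1.toList.isPrefixOf s) = none := by
  have hb := find?_bridge s
  rw [h] at hb
  cases hf : velTable.find? (fun kv => kv.1.toList.isPrefixOf s) with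
  | none => rfl
  | some kv' => rw [hf] at hb; cases hb

-- keys of fixed length n: looking up `s.take n` = finding the first key that prefixes s
theorem lookup_take_eq_find_prefix (n : Nat) (kvs : List (List Char × Char))
    (hn : ∀ kv ∈ kvs, kv.1.length = n) (s : List Char) :
    List.lookup (s.take n) kvs = (kvs.find? (fun kv => kv.1.isPrefixOf s)).map Prod.snd := by
  induction kvs with
  | nil => rfl
  | cons kv tl ih =>
    obtain ⟨k, v⟩ := kv
    have hlen : k.length = n := hn (k, v) (List.mem_cons_self ..)
    have hiff : (s.take n = k) ↔ k.isPrefixOf s = true := by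
      rw [List.isPrefixOf_iff_prefix, List.prefix_iff_eq_take, hlen, eq_comm]
    have ih' := ih (fun x hx => hn x (List.mem_cons_of_mem _ hx))
    by_cases hp : k.isPrefixOf s = true
    · have hb : (s.take n == k) = true := beq_iff_eq.2 (hiff.2 hp)
      simp [List.lookup, List.find?, hb, hp]
    · have hpf : k.isPrefixOf s = false := by rwa [Bool.not_eq_true] at hp
      have hb : (s.take n == k) = false := by
        rw [beq_eq_false_iff_ne]; exact fun he => hp (hiff.1 he)
      simp [List.lookup, List.find?, hb, hpf, ih']

theorem velTrios_len : ∀ kv ∈ velTrios, kv.1.length = 3 := by decide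
theorem velDuos_len : ∀ kv ∈ velDuos, kv.1.length = 2 := by decide
theorem velMonos_len : ∀ kv ∈ velMonos, kv.1.length = 1 := by decide

-- unfolding lemmas for velSub on a non-empty list
theorem velSub_cons_some (c : Char) (rest : List Char) (kv : String × String)
    (hf : velTable.find? (fun kv => kv.1.toList.isPrefixOf (c :: rest)) = some kv) :
    velSub (c :: rest) = kv.2.toList ++ velSub ((c :: rest).drop kv.1.toList.length) := by
  rw [velSub.eq_def]
  split
  · rename_i h'; simp at h'
  · rename_i c' rest' h'
    injection h' with hc hr; subst hc; subst hr
    split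
    · rename_i kv' h''; rw [hf] at h''; injection h'' with he; subst he; rfl
    · rename_i h''; rw [hf] at h''; cases h''

theorem velSub_cons_none (c : Char) (rest : List Char)
    (hf : velTable.find? (fun kv => kv.1.toList.isPrefixOf (c :: rest)) = none) :
    velSub (c :: rest) = c :: velSub rest := by
  rw [velSub.eq_def]
  split
  · rename_i h'; simp at h'
  · rename_i c' rest' h'
    injection h' with hc hr; subst hc; subst hr
    split
    · rename_i kv' h''; rw [hf] at h''; cases h''
    · rfl

-- A's key strings are the 3-, 2- and 1-character prefixes of the remaining input
theorem takes_at (l : List Char) (inc : Nat) (h : inc < l.length) :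
    (l.drop inc).take 3 = l.getD inc ' ' ::
        ((if inc < l.length - 1 then [l.getD (inc+1) ' '] else []) ++
         (if inc < l.length - 2 then [l.getD (inc+2) ' '] else [])) ∧
    (l.drop inc).take 2 = l.getD inc ' ' ::
        (if inc < l.length - 1 then [l.getD (inc+1) ' '] else []) ∧
    (l.drop inc).take 1 = [l.getD inc ' '] := by
  have e0 : l.drop inc = l[inc] :: l.drop (inc+1) := List.drop_eq_getElem_cons h
  have g0 : l.getD inc ' ' = l[inc] := List.getD_eq_getElem l ' ' h
  by_cases h1 : inc + 1 < l.length
  · have e1 : l.drop (inc+1) = l[inc+1] :: l.drop (inc+2) := List.drop_eq_getElem_cons h1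
    have g1 : l.getD (inc+1) ' ' = l[inc+1] := List.getD_eq_getElem l ' ' h1
    by_cases h2 : inc + 2 < l.length
    · have e2 : l.drop (inc+2) = l[inc+2] :: l.drop (inc+3) := List.drop_eq_getElem_cons h2
      have g2 : l.getD (inc+2) ' ' = l[inc+2] := List.getD_eq_getElem l ' ' h2
      rw [e0, e1, e2, g0, g1, g2, if_pos (by omega : inc < l.length - 1),
        if_pos (by omega : inc < l.length - 2)]
      exact ⟨rfl, rfl, rfl⟩
    · have e2 : l.drop (inc+2) = [] := List.drop_eq_nil_of_le (by omega)
      rw [e0, e1, e2, g0, g1, if_pos (by omega : inc < l.length - 1),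
        if_neg (by omega : ¬ inc < l.length - 2)]
      exact ⟨rfl, rfl, rfl⟩
  · have e1 : l.drop (inc+1) = [] := List.drop_eq_nil_of_le (by omega)
    rw [e0, e1, g0, if_neg (by omega : ¬ inc < l.length - 1),
      if_neg (by omega : ¬ inc < l.length - 2)]
    exact ⟨rfl, rfl, rfl⟩

-- the main invariant: A's loop from cursor `inc` appends B's substitution of the suffix
theorem velLoopA_eq_velSub (n : Nat) : ∀ (l : List Char) (inc : Nat) (tgt : List Char),
    l.length - inc ≤ n → velLoopA l inc tgt = tgt ++ velSub (l.drop inc) := by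
  induction n with
  | zero =>
    intro l inc tgt hle
    rw [velLoopA, dif_neg (by omega : ¬ inc < l.length),
      List.drop_eq_nil_of_le (by omega), velSub, List.append_nil]
  | succ n ih =>
    intro l inc tgt hle
    by_cases h : inc < l.length
    · obtain ⟨t3, t2, t1⟩ := takes_at l inc h
      obtain ⟨c, rest, hcr⟩ : ∃ c rest, l.drop inc = c :: rest := by
        match hd : l.drop inc with
        | [] => rw [List.drop_eq_nil_iff] at hd; omega
        | c :: rest => exact ⟨c, rest, rfl⟩
      have hfind :
          (velTrios ++ velDuos ++ velMonos).find? (fun kv => kv.1.isPrefixOf (l.drop inc)) =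
            ((velTrios.find? (fun kv => kv.1.isPrefixOf (l.drop inc))).or
             (velDuos.find? (fun kv => kv.1.isPrefixOf (l.drop inc)))).or
              (velMonos.find? (fun kv => kv.1.isPrefixOf (l.drop inc))) := by
        rw [List.find?_append, List.find?_append]
      have lk3 := lookup_take_eq_find_prefix 3 velTrios velTrios_len (l.drop inc)
      have lk2 := lookup_take_eq_find_prefix 2 velDuos velDuos_len (l.drop inc)
      have lk1 := lookup_take_eq_find_prefix 1 velMonos velMonos_len (l.drop inc)
      rw [t3] at lk3; rw [t2] at lk2; rw [t1] at lk1
      rw [velLoopA, dif_pos h]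
      cases h3 : velTrios.find? (fun kv => kv.1.isPrefixOf (l.drop inc)) with
      | some kv =>
        have hk : kv.1.length = 3 := velTrios_len _ (List.mem_of_find?_eq_some h3)
        have hfT : (velTrios ++ velDuos ++ velMonos).find?
            (fun kv => kv.1.isPrefixOf (l.drop inc)) = some kv := by
          rw [hfind, h3]; simp
        obtain ⟨kv', hf', hk1, hk2⟩ := bridge_some _ _ hfT
        simp only [lk3, h3, Option.map_some]
        rw [ih l (inc+3) (tgt ++ [kv.2]) (by omega), hcr,
          velSub_cons_some c rest kv' (hcr ▸ hf'), hk1, hk2, ← hcr, hk, List.drop_drop]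
        simp
      | none =>
        simp only [lk3, h3, Option.map_none]
        cases h2 : velDuos.find? (fun kv => kv.1.isPrefixOf (l.drop inc)) with
        | some kv =>
          have hk : kv.1.length = 2 := velDuos_len _ (List.mem_of_find?_eq_some h2)
          have hfT : (velTrios ++ velDuos ++ velMonos).find?
              (fun kv => kv.1.isPrefixOf (l.drop inc)) = some kv := by
            rw [hfind, h3, h2]; simp
          obtain ⟨kv', hf', hk1, hk2⟩ := bridge_some _ _ hfT
          simp only [lk2, h2, Option.map_some]
          rw [ih l (inc+2) (tgt ++ [kv.2]) (by omega), hcr,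
            velSub_cons_some c rest kv' (hcr ▸ hf'), hk1, hk2, ← hcr, hk, List.drop_drop]
          simp
        | none =>
          simp only [lk2, h2, Option.map_none]
          cases h1 : velMonos.find? (fun kv => kv.1.isPrefixOf (l.drop inc)) with
          | some kv =>
            have hk : kv.1.length = 1 := velMonos_len _ (List.mem_of_find?_eq_some h1)
            have hfT : (velTrios ++ velDuos ++ velMonos).find?
                (fun kv => kv.1.isPrefixOf (l.drop inc)) = some kv := by
              rw [hfind, h3, h2, h1]; simp
            obtain ⟨kv', hf', hk1, hk2⟩ := bridge_some _ _ hfT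
            simp only [lk1, h1, Option.map_some]
            rw [ih l (inc+1) (tgt ++ [kv.2]) (by omega), hcr,
              velSub_cons_some c rest kv' (hcr ▸ hf'), hk1, hk2, ← hcr, hk, List.drop_drop]
            simp
          | none =>
            have hfT : (velTrios ++ velDuos ++ velMonos).find?
                (fun kv => kv.1.isPrefixOf (l.drop inc)) = none := by
              rw [hfind, h3, h2, h1]; rfl
            have hf' := bridge_none _ hfT
            simp only [lk1, h1, Option.map_none]
            rw [ih l (inc+1) (tgt ++ [l.getD inc ' ']) (by omega), hcr,
              velSub_cons_none c rest (hcr ▸ hf')]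
            have hc : c = l.getD inc ' ' := by
              have ht := t1; rw [hcr] at ht; simpa using ht
            have hr : rest = l.drop (inc+1) := by
              have ht : (l.drop inc).tail = l.drop (inc+1) := by rw [List.tail_drop]
              rw [hcr] at ht; simpa using ht
            rw [hc, hr]; simp
    · rw [velLoopA, dif_neg h, List.drop_eq_nil_of_le (by omega), velSub, List.append_nil]

-- ===== VERDICT (by name: the statement is the Claim_ definition above) =====
theorem vel2slp_spec : Claim_equal_vel2slp := by
  intro src _
  unfold Spec_vel2slp vel2slp vel2slp_alt
  rw [velLoopA_eq_velSub (src.toList.length) src.toList 0 [] (by omega)]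
  simp
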